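-- pv_equiv track=rewrite | github.com/Kyriaki-Koffa/VolExplore-Diploma-Thesis | utils.py | ReRoute
-- ===== SOURCE A (Python) =====
-- from copy import deepcopy
--
-- def ReRoute(route):
--
--     reRouted = []
--     tempRoute = []
--
--     for i, part in enumerate(route):
--         if i == 0:
--             if i != len(route)-1:
--                 # LOOK IF THE LAST COORDSET OF THE FIRST PART EXISTS IN THE NEXT PART. IF IT DOES NOT THEN REVERSE
--                 if (part[-1] != route[i+1][0]) and (part[-1] != route[i+1][-1]):
--                     temp = deepcopy(part)
--                     temp.reverse()
--                     tempRoute.append(temp) # the first part definitely belongs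
--                 else:
--                     temp = deepcopy(part)
--                     tempRoute.append(temp)
--         else:
--             if part[0] != tempRoute[len(tempRoute)-1][-1]:
--                 # we want the first coordset to match the last coordset of the last edge path thing
--                 temp = deepcopy(part)
--                 temp.reverse()
--                 tempRoute.append(temp)
--             else:
--                 temp = deepcopy(part)
--                 tempRoute.append(temp)
--
--     for i, part in enumerate(tempRoute):
--         for coordSet in part:
--             temp = deepcopy(coordSet)
--             temp.reverse()
--             reRouted.append(temp)
--
--     return reRouted
-- ===== SOURCE B (Python) =====
-- def ReRoute(route):
--     # Recursive decomposition: never materializes oriented parts; tracks only the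
--     # endpoint coordset symbolically (part[0] if reversed else part[-1]).
--     if len(route) <= 1:
--         return []
--     first = route[0]
--     rev0 = first[-1] != route[1][0] and first[-1] != route[1][-1]
--     end0 = first[0] if rev0 else first[-1]
--     return _emit(first, rev0) + _rest(end0, route[1:])
--
-- def _rest(prev_end, parts):
--     if not parts:
--         return []
--     p = parts[0]
--     rev = p[0] != prev_end
--     end = p[0] if rev else p[-1]
--     return _emit(p, rev) + _rest(end, parts[1:])
--
-- def _emit(part, rev):
--     seq = reversed(part) if rev else part
--     return [cs[::-1] for cs in seq]
-- ===== Notes on version B (the rewrite author's own statement) =====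
-- stated objective: alternative
-- what changed: B is a pair of recursive functions that build the result by concatenation and never materialize oriented parts: instead of A's two staged passes (construct a tempRoute list of deep-copied oriented parts, then index into it and flatten), B threads only the symbolic endpoint coordset (part[0] if reversed else part[-1]) through the recursion and emits each part's reversed coordsets directly.
import Mathlib
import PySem

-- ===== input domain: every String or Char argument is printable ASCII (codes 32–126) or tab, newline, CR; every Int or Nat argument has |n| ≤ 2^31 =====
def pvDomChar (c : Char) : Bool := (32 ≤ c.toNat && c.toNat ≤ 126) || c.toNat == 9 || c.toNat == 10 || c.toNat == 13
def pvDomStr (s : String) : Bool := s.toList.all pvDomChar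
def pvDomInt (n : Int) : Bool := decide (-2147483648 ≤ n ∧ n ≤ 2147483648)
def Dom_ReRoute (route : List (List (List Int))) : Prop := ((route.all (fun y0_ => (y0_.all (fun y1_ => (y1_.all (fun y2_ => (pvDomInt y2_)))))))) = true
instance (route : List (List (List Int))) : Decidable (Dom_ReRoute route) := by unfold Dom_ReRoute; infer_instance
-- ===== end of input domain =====

-- B replaces A's two staged passes over a materialized tempRoute by recursion that threads
-- only the symbolic endpoint coordset; equivalence is about the return value (neither mutates its input).

-- ===== PORT A =====
-- first loop of A: builds tempRoute; `.getD []` marks where Python raises IndexError (excluded by Pre_)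
def ReRoute.loop1 (route : List (List (List Int))) :
    Nat → List (List (List Int)) → List (List (List Int)) → List (List (List Int))
  | _, [], temp => temp
  | i, part :: rest, temp =>
    let temp' :=
      if i = 0 then
        if i ≠ route.length - 1 then
          if ((PySem.List.pyGet? part (-1)).getD [] ≠ (PySem.List.pyGet? (route.getD (i+1) []) 0).getD [])
              ∧ ((PySem.List.pyGet? part (-1)).getD [] ≠ (PySem.List.pyGet? (route.getD (i+1) []) (-1)).getD []) then
            temp ++ [part.reverse]
          else temp ++ [part]
        else temp
      else
        if (PySem.List.pyGet? part 0).getD [] ≠ (PySem.List.pyGet? (temp.getD (temp.length - 1) []) (-1)).getD [] then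
          temp ++ [part.reverse]
        else temp ++ [part]
    ReRoute.loop1 route (i+1) rest temp'

def ReRoute (route : List (List (List Int))) : List (List Int) :=
  let tempRoute := ReRoute.loop1 route 0 route []
  -- second loop of A: append each internally-reversed coordset
  tempRoute.foldl (fun acc part => part.foldl (fun a cs => a ++ [cs.reverse]) acc) []

-- ===== PORT B =====
-- _emit of Source B: the part's coordsets (in reversed order if rev), each internally reversed
def ReRoute_alt.emit (part : List (List Int)) (rev : Bool) : List (List Int) :=
  (if rev then part.reverse else part).map List.reverse
-- _rest of Source B: recursion threading the symbolic endpoint coordset; `.getD []` marks IndexError (excluded by Pre_)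
def ReRoute_alt.rest (prevEnd : List Int) : List (List (List Int)) → List (List Int)
  | [] => []
  | p :: parts =>
    let rev := decide ((PySem.List.pyGet? p 0).getD [] ≠ prevEnd)
    let e := if rev then (PySem.List.pyGet? p 0).getD [] else (PySem.List.pyGet? p (-1)).getD []
    ReRoute_alt.emit p rev ++ ReRoute_alt.rest e parts

def ReRoute_alt (route : List (List (List Int))) : List (List Int) :=
  if route.length ≤ 1 then []
  else
    let first := route.getD 0 []
    let rev0 := decide (((PySem.List.pyGet? first (-1)).getD [] ≠ (PySem.List.pyGet? (route.getD 1 []) 0).getD [])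
      ∧ ((PySem.List.pyGet? first (-1)).getD [] ≠ (PySem.List.pyGet? (route.getD 1 []) (-1)).getD []))
    let end0 := if rev0 then (PySem.List.pyGet? first 0).getD [] else (PySem.List.pyGet? first (-1)).getD []
    ReRoute_alt.emit first rev0 ++ ReRoute_alt.rest end0 (route.drop 1)

-- ===== PRECONDITION & SPEC =====
-- Pre_ excludes exactly the inputs where Python A raises IndexError: a route with
-- more than one part containing an empty part (part[-1] / part[0] on []).
def Pre_ReRoute (route : List (List (List Int))) : Prop :=
  route.length ≤ 1 ∨ ∀ p ∈ route, p ≠ []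
instance (route : List (List (List Int))) : Decidable (Pre_ReRoute route) := by
  unfold Pre_ReRoute; infer_instance

def pvWitness_ReRoute : List (List (List Int)) := [[[1, 2], [3, 4]], [[5, 6], [3, 4]]]

def Spec_ReRoute (route : List (List (List Int))) (out : List (List Int)) : Prop := out = ReRoute_alt route
instance (route : List (List (List Int))) (out : List (List Int)) : Decidable (Spec_ReRoute route out) := by unfold Spec_ReRoute; infer_instance

-- ===== CLAIM (what is proved, stated in full; the proofs are below) =====
def Claim_equal_ReRoute : Prop := ∀ (route : List (List (List Int))), Dom_ReRoute route → Pre_ReRoute route → Spec_ReRoute route (ReRoute route)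

-- ===== LEMMAS AND PROOFS =====

-- the orientation chain implicit in A's first loop after index 0
def orientRest (pe : List Int) : List (List (List Int)) → List (List (List Int))
  | [] => []
  | part :: rest =>
    let q := if (PySem.List.pyGet? part 0).getD [] ≠ pe then part.reverse else part
    q :: orientRest ((PySem.List.pyGet? q (-1)).getD []) rest

def peOf (ts : List (List (List Int))) : List Int :=
  (PySem.List.pyGet? (ts.getD (ts.length - 1) []) (-1)).getD []

theorem getD_append_singleton (ts : List (List (List Int))) (q : List (List Int)) :
    (ts ++ [q]).getD ((ts ++ [q]).length - 1) [] = q := by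
  simp [List.getD]

theorem loop1_eq (route : List (List (List Int))) (parts : List (List (List Int))) :
    ∀ (i : Nat) (ts : List (List (List Int))), i ≠ 0 →
      ReRoute.loop1 route i parts ts = ts ++ orientRest (peOf ts) parts := by
  induction parts with
  | nil => intro i ts hi; simp [ReRoute.loop1, orientRest]
  | cons p rest ih =>
    intro i ts hi
    have hstep : ReRoute.loop1 route i (p :: rest) ts =
        ReRoute.loop1 route (i+1) rest
          (ts ++ [if (PySem.List.pyGet? p 0).getD [] ≠ peOf ts then p.reverse else p]) := by
      simp only [ReRoute.loop1, if_neg hi, peOf]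
      split <;> rfl
    rw [hstep, ih (i+1) _ (Nat.succ_ne_zero i)]
    have hpe : peOf (ts ++ [if (PySem.List.pyGet? p 0).getD [] ≠ peOf ts then p.reverse else p]) =
        (PySem.List.pyGet? (if (PySem.List.pyGet? p 0).getD [] ≠ peOf ts then p.reverse else p) (-1)).getD [] := by
      simp only [peOf, getD_append_singleton]
    rw [hpe]
    simp [orientRest]

-- the last coordset of a reversed part is the first coordset of the part
theorem pyGet_reverse_neg_one (p : List (List Int)) :
    (PySem.List.pyGet? p.reverse (-1)).getD [] = (PySem.List.pyGet? p 0).getD [] := by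
  cases p <;> simp [PySem.List.pyGet?_neg_one, PySem.List.pyGet?_zero, List.getLast?_reverse]

-- B's recursion equals the flattened, coordset-reversed orientation chain
theorem rest_eq (parts : List (List (List Int))) :
    ∀ pe : List Int,
      ReRoute_alt.rest pe parts = (orientRest pe parts).flatMap (fun q => q.map List.reverse) := by
  induction parts with
  | nil => intro pe; simp [ReRoute_alt.rest, orientRest]
  | cons p rest ih =>
    intro pe
    by_cases hc : (PySem.List.pyGet? p 0).getD [] ≠ pe
    · simp [ReRoute_alt.rest, orientRest, hc, ih, ReRoute_alt.emit, pyGet_reverse_neg_one]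
    · simp [ReRoute_alt.rest, orientRest, hc, ih, ReRoute_alt.emit]

theorem inner_foldl (part : List (List Int)) :
    ∀ acc : List (List Int),
      part.foldl (fun a cs => a ++ [cs.reverse]) acc = acc ++ part.map List.reverse := by
  induction part with
  | nil => intro acc; simp
  | cons c t ih => intro acc; simp [ih]

theorem outer_foldl (ts : List (List (List Int))) :
    ∀ acc : List (List Int),
      ts.foldl (fun acc part => part.foldl (fun a cs => a ++ [cs.reverse]) acc) acc =
        acc ++ ts.flatMap (fun q => q.map List.reverse) := by
  induction ts with
  | nil => intro acc; simp
  | cons p rest ih =>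
    intro acc
    rw [List.foldl_cons, inner_foldl, ih]
    simp

-- ===== VERDICT (by name: the statement is the Claim_ definition above) =====
theorem ReRoute_spec : Claim_equal_ReRoute := by
  intro route _ _
  unfold Spec_ReRoute
  match route with
  | [] => rfl
  | [p] => rfl
  | p0 :: p1 :: rest =>
    have hlen : ¬ ((p0 :: p1 :: rest).length ≤ 1) := by simp
    unfold ReRoute ReRoute_alt
    rw [if_neg hlen]
    rw [show ReRoute.loop1 (p0 :: p1 :: rest) 0 (p0 :: p1 :: rest) [] =
        ReRoute.loop1 (p0 :: p1 :: rest) 1 (p1 :: rest)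
          [if ((PySem.List.pyGet? p0 (-1)).getD [] ≠ (PySem.List.pyGet? p1 0).getD [])
              ∧ ((PySem.List.pyGet? p0 (-1)).getD [] ≠ (PySem.List.pyGet? p1 (-1)).getD []) then
            p0.reverse else p0] from by simp [ReRoute.loop1, List.getD, apply_ite]; split_ifs <;> simp_all]
    rw [loop1_eq _ _ 1 _ one_ne_zero, outer_foldl]
    by_cases hc : ((PySem.List.pyGet? p0 (-1)).getD [] ≠ (PySem.List.pyGet? p1 0).getD [])
        ∧ ((PySem.List.pyGet? p0 (-1)).getD [] ≠ (PySem.List.pyGet? p1 (-1)).getD [])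
    · simp [hc, rest_eq, ReRoute_alt.emit, peOf, List.getD, pyGet_reverse_neg_one]
    · simp [hc, rest_eq, ReRoute_alt.emit, peOf, List.getD]
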